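-- pv_equiv track=rewrite | github.com/nvmexp/lw_runtime | libraries/lwblas/test/scripts/helpers/utility.py | get_flags_intersection
-- ===== SOURCE A (Python) =====
-- def get_flags_intersection(flags_a, flags_b):
--     intersecting_flags = set()
--
--     for flag in flags_a:
--         if not (flag in flags_b) or flags_a[flag] != flags_b[flag]:
--             intersecting_flags.add(flag)
--
--     for flag in flags_b:
--         if not (flag in flags_a) or flags_b[flag] != flags_a[flag]:
--             intersecting_flags.add(flag)
--
--     return intersecting_flags
-- ===== SOURCE B (Python) =====
-- def get_flags_intersection(flags_a, flags_b):
--     # Consume a working copy of flags_b: pop each flags_a key out of it; a key is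
--     # reported when the popped value (None when absent) differs from flags_a's value.
--     # Whatever survives in the copy exists only in flags_b, so it is reported too.
--     remaining = dict(flags_b)
--     differing = [k for k, v in flags_a.items() if remaining.pop(k, None) != v]
--     return set(differing).union(remaining)
-- ===== Notes on version B (the rewrite author's own statement) =====
-- stated objective: alternative
-- what changed: Instead of two symmetric membership-testing loops over both dicts feeding one accumulator set, B destructively consumes a working copy of flags_b: each flags_a key is popped out of it and reported when the popped value differs, and the keys left over in the copy are exactly the flags_b-only keys, so the second value-comparing pass disappears.
import Mathlib
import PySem

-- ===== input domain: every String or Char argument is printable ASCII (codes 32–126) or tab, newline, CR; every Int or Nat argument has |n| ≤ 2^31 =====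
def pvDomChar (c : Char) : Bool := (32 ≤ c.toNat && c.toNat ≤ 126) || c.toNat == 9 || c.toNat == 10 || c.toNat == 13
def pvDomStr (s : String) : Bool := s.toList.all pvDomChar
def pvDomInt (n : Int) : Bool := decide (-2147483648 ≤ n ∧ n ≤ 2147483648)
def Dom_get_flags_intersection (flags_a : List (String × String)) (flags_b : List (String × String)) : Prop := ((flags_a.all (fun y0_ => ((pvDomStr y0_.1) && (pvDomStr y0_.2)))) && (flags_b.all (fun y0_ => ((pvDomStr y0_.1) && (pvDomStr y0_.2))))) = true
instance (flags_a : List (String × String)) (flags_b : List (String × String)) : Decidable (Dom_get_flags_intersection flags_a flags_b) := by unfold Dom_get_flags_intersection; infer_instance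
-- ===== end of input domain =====

-- B consumes a working copy of flags_b (popping each flags_a key out of it) instead of
-- A's two symmetric membership-testing loops; equivalence of the returned set (objective: alternative).


-- ===== PORT A =====
def get_flags_intersection (flags_a : List (String × String)) (flags_b : List (String × String)) : List String :=
  let da : PySem.Dict String String := PySem.Dict.ofList flags_a
  let db : PySem.Dict String String := PySem.Dict.ofList flags_b
  -- intersecting_flags = set(); first loop over flags_a
  let s1 : PySem.Set String :=
    da.keys.foldl
      (fun s flag => if (!(db.contains flag)) || (da.get? flag != db.get? flag)
                     then PySem.Set.add s flag else s)
      PySem.Set.empty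
  -- second loop over flags_b
  db.keys.foldl
    (fun s flag => if (!(da.contains flag)) || (db.get? flag != da.get? flag)
                   then PySem.Set.add s flag else s)
    s1

-- ===== PORT B =====
-- one step of B's comprehension: remaining.pop(k, None) != v  (values are strings here,
-- so a missing key — Python's None — always differs from v; the 'none' branch is exact)
def stepB (p : PySem.Dict String String × List String) (kv : String × String) :
    PySem.Dict String String × List String :=
  match p.1.pop? kv.1 with
  | some wr => (wr.2, if wr.1 != kv.2 then p.2 ++ [kv.1] else p.2)
  | none    => (p.1, p.2 ++ [kv.1])

def get_flags_intersection_alt (flags_a : List (String × String)) (flags_b : List (String × String)) : List String :=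
  let da : PySem.Dict String String := PySem.Dict.ofList flags_a
  -- remaining = dict(flags_b)
  let r0 : PySem.Dict String String := PySem.Dict.ofList flags_b
  -- differing = [k for k, v in flags_a.items() if remaining.pop(k, None) != v]
  let st := da.items.foldl stepB (r0, [])
  -- return set(differing).union(remaining)
  PySem.Set.union (PySem.Set.ofList st.2) st.1.keys

-- ===== PRECONDITION & SPEC =====
def Spec_get_flags_intersection (flags_a : List (String × String)) (flags_b : List (String × String)) (out : List String) : Prop := out = get_flags_intersection_alt flags_a flags_b
instance (flags_a : List (String × String)) (flags_b : List (String × String)) (out : List String) : Decidable (Spec_get_flags_intersection flags_a flags_b out) := by unfold Spec_get_flags_intersection; infer_instance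

-- ===== CLAIM (what is proved, stated in full; the proofs are below) =====
def Claim_equal_get_flags_intersection : Prop := ∀ (flags_a : List (String × String)) (flags_b : List (String × String)), Dom_get_flags_intersection flags_a flags_b → Spec_get_flags_intersection flags_a flags_b (get_flags_intersection flags_a flags_b)

-- ===== LEMMAS AND PROOFS =====

-- On a key of d, the loop's guard '¬ contains other k ∨ get? d k ≠ get? other k'
-- coincides with the unified predicate 'get? d k ≠ get? other k'.
theorem cond_eq_pred (d other : PySem.Dict String String) (k : String) (hk : k ∈ d.keys) :
    ((!(other.contains k)) || (d.get? k != other.get? k)) = (d.get? k != other.get? k) := by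
  by_cases h : other.contains k = true
  · simp [h]
  · have hnone : other.get? k = none := by
      simpa [PySem.Dict.contains_eq_isSome_get?, Option.isSome_iff_ne_none] using h
    have hsome : d.get? k ≠ none := by
      simpa [PySem.Dict.get?_eq_none_iff_not_mem_keys] using hk
    simp [h, hnone, bne_iff_ne, hsome]

theorem bne_symm_opt (x y : Option String) : (x != y) = (y != x) := by
  rw [Bool.eq_iff_iff]
  simp [bne_iff_ne, ne_comm]

-- A's two set-accumulating loops, in normal form: one ofList of two filtered key lists.
theorem A_normal (fa fb : List (String × String)) :
    get_flags_intersection fa fb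
      = PySem.Set.ofList
          (((PySem.Dict.ofList fa).keys.filter
              (fun k => (PySem.Dict.ofList fa).get? k != (PySem.Dict.ofList fb).get? k))
           ++ ((PySem.Dict.ofList fb).keys.filter
              (fun k => (PySem.Dict.ofList fa).get? k != (PySem.Dict.ofList fb).get? k))) := by
  unfold get_flags_intersection
  set da := PySem.Dict.ofList fa with hda
  set db := PySem.Dict.ofList fb with hdb
  have hA : ∀ (l : List String) (s : PySem.Set String) (c : String → Bool),
      l.foldl (fun s flag => if c flag then PySem.Set.add s flag else s) s
        = (l.filter c).foldl PySem.Set.add s := by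
    intro l s c
    rw [List.foldl_filter]
  rw [hA, hA, PySem.Set.ofList_eq_foldl, List.foldl_append]
  rw [List.filter_congr (fun k hk => cond_eq_pred da db k hk),
      List.filter_congr (fun k hk => (cond_eq_pred db da k hk).trans (bne_symm_opt _ _))]
  rfl

-- erase of an absent key is the identity
theorem erase_of_get?_none (d : PySem.Dict String String) (k : String)
    (h : d.get? k = none) : d.erase k = d := by
  apply PySem.Dict.ext
  show d.items.filter (fun p => !(p.1 == k)) = d.items
  rw [List.filter_eq_self]
  intro p hp
  rcases Option.map_eq_none_iff.mp h with hf
  have := List.find?_eq_none.mp hf p hp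
  simpa using this

-- erase does not change other lookups
theorem get?_erase_of_ne (d : PySem.Dict String String) (k k' : String) (h : k' ≠ k) :
    (d.erase k).get? k' = d.get? k' := by
  show ((d.items.filter (fun p => !(p.1 == k))).find? (fun p => p.1 == k')).map (·.2)
        = (d.items.find? (fun p => p.1 == k')).map (·.2)
  congr 1
  induction d.items with
  | nil => rfl
  | cons p l ih =>
    by_cases hpk : p.1 = k
    · rw [List.filter_cons_of_neg (by simp [hpk]),
          List.find?_cons_of_neg (by simp [hpk, Ne.symm h]), ih]
    · by_cases hpk' : p.1 = k'
      · rw [List.filter_cons_of_pos (by simp [hpk]),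
            List.find?_cons_of_pos (by simp [hpk']), List.find?_cons_of_pos (by simp [hpk'])]
      · rw [List.filter_cons_of_pos (by simp [hpk]),
            List.find?_cons_of_neg (by simp [hpk']), List.find?_cons_of_neg (by simp [hpk']), ih]

-- keys after erasing one key
theorem keys_erase (d : PySem.Dict String String) (k : String) :
    (d.erase k).keys = d.keys.filter (fun x => !(x == k)) := by
  show (d.items.filter (fun p => !(p.1 == k))).map (·.1)
        = (d.items.map (·.1)).filter (fun x => !(x == k))
  induction d.items with
  | nil => rfl
  | cons p l ih =>
    by_cases hpk : p.1 = k
    · rw [List.filter_cons_of_neg (by simp [hpk]), List.map_cons,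
          List.filter_cons_of_neg (by simp [hpk]), ih]
    · rw [List.filter_cons_of_pos (by simp [hpk]), List.map_cons, List.map_cons,
          List.filter_cons_of_pos (by simp [hpk]), ih]

-- keys after erasing a list of keys
theorem keys_foldl_erase (L : List (String × String)) (r : PySem.Dict String String) :
    (L.foldl (fun d kv => d.erase kv.1) r).keys
      = r.keys.filter (fun x => !((L.map Prod.fst).contains x)) := by
  induction L generalizing r with
  | nil => simp
  | cons kv L ih =>
    rw [List.foldl_cons, ih, keys_erase, List.filter_filter]
    apply List.filter_congr
    intro x _
    by_cases hx : x = kv.1 <;> simp [hx, Bool.and_comm]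

-- B's pop-loop, characterised: final remaining dict and the collected differing keys
theorem foldB (L : List (String × String)) (r : PySem.Dict String String) (ds : List String)
    (hnd : (L.map Prod.fst).Nodup) :
    L.foldl stepB (r, ds)
      = (L.foldl (fun d kv => d.erase kv.1) r,
         ds ++ (L.filter (fun kv => !(r.get? kv.1 == some kv.2))).map Prod.fst) := by
  induction L generalizing r ds with
  | nil => simp
  | cons kv L ih =>
    rw [List.map_cons, List.nodup_cons] at hnd
    obtain ⟨hk, hnd'⟩ := hnd
    rcases hcase : r.get? kv.1 with _ | w
    · have hstep : stepB (r, ds) kv = (r, ds ++ [kv.1]) := by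
        simp [stepB, PySem.Dict.pop?, hcase]
      have hid : r.erase kv.1 = r := erase_of_get?_none r kv.1 hcase
      rw [List.foldl_cons, List.foldl_cons, hstep, ih _ _ hnd', hid,
          List.filter_cons_of_pos (by simp [hcase])]
      simp
    · have hcong : ∀ kv' ∈ L, (!((r.erase kv.1).get? kv'.1 == some kv'.2))
          = (!(r.get? kv'.1 == some kv'.2)) := by
        intro kv' hkv'
        have hne : kv'.1 ≠ kv.1 := fun he => hk (he ▸ List.mem_map_of_mem hkv')
        rw [get?_erase_of_ne _ _ _ hne]
      have hstep : stepB (r, ds) kv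
          = (r.erase kv.1, if w != kv.2 then ds ++ [kv.1] else ds) := by
        simp [stepB, PySem.Dict.pop?, hcase]
      rw [List.foldl_cons, List.foldl_cons, hstep, ih _ _ hnd', List.filter_congr hcong]
      by_cases hw : w = kv.2
      · rw [List.filter_cons_of_neg (by simp [hcase, hw])]
        simp [hw]
      · rw [List.filter_cons_of_pos (by simp [hcase, hw])]
        simp [hw]

-- B, in normal form: the differing flags_a keys, updated with the flags_b-only keys.
theorem B_normal (fa fb : List (String × String)) :
    get_flags_intersection_alt fa fb
      = PySem.Set.update
          ((PySem.Dict.ofList fa).keys.filter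
              (fun k => (PySem.Dict.ofList fa).get? k != (PySem.Dict.ofList fb).get? k))
          ((PySem.Dict.ofList fb).keys.filter
              (fun k => !((PySem.Dict.ofList fa).keys.contains k))) := by
  unfold get_flags_intersection_alt
  dsimp only
  set da := PySem.Dict.ofList fa with hda
  set db := PySem.Dict.ofList fb with hdb
  have hnda : da.keys.Nodup := PySem.Dict.nodup_keys_ofList fa
  rw [foldB _ _ _ hnda]
  have hkeys : (da.items.foldl (fun d kv => d.erase kv.1) db).keys
      = db.keys.filter (fun k => !(da.keys.contains k)) := keys_foldl_erase da.items db
  have hds : (da.items.filter (fun kv => !(db.get? kv.1 == some kv.2))).map Prod.fst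
      = da.keys.filter (fun k => da.get? k != db.get? k) := by
    rw [PySem.Dict.items_eq_map_keys da hnda ""]
    rw [List.filter_map, List.map_map]
    have hpt : ∀ k ∈ da.keys,
        ((fun kv => !(db.get? kv.1 == some kv.2)) ∘ (fun k => (k, da.getD k ""))) k
          = (da.get? k != db.get? k) := by
      intro k hk
      have hsome : da.get? k = some (da.getD k "") := by
        rcases hg : da.get? k with _ | v
        · exact absurd hk (by simpa [PySem.Dict.get?_eq_none_iff_not_mem_keys] using hg)
        · rw [PySem.Dict.getD_of_get?_eq_some da "" hg]
      simp only [Function.comp]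
      rw [← hsome]
      exact bne_symm_opt (db.get? k) (da.get? k)
    rw [List.filter_congr hpt]
    rw [show (Prod.fst ∘ fun k : String => (k, da.getD k "")) = id from rfl, List.map_id]
  rw [hkeys, hds]
  simp only [PySem.Set.union]
  rw [List.nil_append, PySem.Set.ofList_eq_self_of_nodup _ (hnda.filter _)]

-- the two normal forms denote the same list
theorem union_filter_eq (fa fb : List (String × String)) :
    get_flags_intersection fa fb = get_flags_intersection_alt fa fb := by
  rw [A_normal, B_normal]
  set da := PySem.Dict.ofList fa with hda
  set db := PySem.Dict.ofList fb with hdb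
  have hnda : da.keys.Nodup := PySem.Dict.nodup_keys_ofList fa
  have hndb : db.keys.Nodup := PySem.Dict.nodup_keys_ofList fb
  set l1 := da.keys.filter (fun k => da.get? k != db.get? k) with hl1
  have hnl1 : l1.Nodup := hnda.filter _
  have e1 : PySem.Set.ofList l1 = l1 := PySem.Set.ofList_eq_self_of_nodup l1 hnl1
  have e2 : PySem.Set.ofList (db.keys.filter (fun k => da.get? k != db.get? k))
      = db.keys.filter (fun k => da.get? k != db.get? k) :=
    PySem.Set.ofList_eq_self_of_nodup _ (hndb.filter _)
  have e3 : PySem.Set.ofList (db.keys.filter (fun k => !(da.keys.contains k)))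
      = db.keys.filter (fun k => !(da.keys.contains k)) :=
    PySem.Set.ofList_eq_self_of_nodup _ (hndb.filter _)
  rw [PySem.Set.ofList_append, e1,
      PySem.Set.update_eq_append_filter, PySem.Set.update_eq_append_filter, e2, e3,
      List.filter_filter, List.filter_filter]
  congr 1
  apply List.filter_congr
  intro k hk
  have hbk : db.get? k ≠ none := by
    simpa [PySem.Dict.get?_eq_none_iff_not_mem_keys] using hk
  rcases hg : da.get? k with _ | v
  · -- k not in flags_a: both predicates keep k
    have hout : k ∉ da.keys := by simpa [PySem.Dict.get?_eq_none_iff_not_mem_keys] using hg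
    have hnotl1 : k ∉ l1 := fun hmem => hout (List.mem_of_mem_filter hmem)
    simp [hout, hnotl1]
    exact fun h => hbk h.symm
  · -- k in flags_a: B drops it; A keeps it only if values differ, but then k ∈ l1 already
    have hmem : k ∈ da.keys := by
      have hne : da.get? k ≠ none := by simp [hg]
      simpa [PySem.Dict.get?_eq_none_iff_not_mem_keys] using hne
    by_cases hdiff : da.get? k = db.get? k
    · simp [hmem]
      exact fun _ => hg ▸ hdiff
    · have hkl1 : k ∈ l1 := by
        rw [hl1]
        exact List.mem_filter.mpr ⟨hmem, by simp [bne_iff_ne, hdiff]⟩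
      simp [hmem, hkl1]

-- ===== VERDICT (by name: the statement is the Claim_ definition above) =====
theorem get_flags_intersection_spec : Claim_equal_get_flags_intersection := by
  intro fa fb _
  unfold Spec_get_flags_intersection
  exact union_filter_eq fa fb
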